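-- pv_equiv track=rewrite | github.com/R3DK3LL/universal-entropy-engine | mathematical-engine/enhanced_wrapper1.py | _trace_pathways
-- ===== SOURCE A (Python) =====
-- def _trace_pathways(grid):
--     """Trace continuous pathways using DFS"""
--     height, width = len(grid), len(grid[0])
--     visited = [[False] * width for _ in range(height)]
--     pathways = []
--
--     def dfs(i, j, path):
--         if (
--             i < 0
--             or i >= height
--             or j < 0
--             or j >= width
--             or visited[i][j]
--             or grid[i][j] == 0
--         ):
--             return
--
--         visited[i][j] = True
--         path.append((i, j))
--
--         # Continue DFS in 8 directions
--         for di in [-1, 0, 1]: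
--             for dj in [-1, 0, 1]:
--                 if di != 0 or dj != 0:
--                     dfs(i + di, j + dj, path)
--
--     # Find all continuous pathways
--     for i in range(height):
--         for j in range(width):
--             if grid[i][j] == 1 and not visited[i][j]:
--                 pathway = []
--                 dfs(i, j, pathway)
--                 if len(pathway) >= 3:  # Minimum continuity requirement
--                     pathways.append(pathway)
--
--     return pathways
-- ===== SOURCE B (Python) =====
-- def _trace_pathways(grid):
--     """Trace continuous pathways using an explicit-stack iterative DFS (no recursion)."""
--     height, width = len(grid), len(grid[0])
--     visited = [[False] * width for _ in range(height)]
--     pathways = []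
--     dirs = [(-1, -1), (-1, 0), (-1, 1), (0, -1), (0, 1), (1, -1), (1, 0), (1, 1)]
--
--     for i in range(height):
--         for j in range(width):
--             if grid[i][j] == 1 and not visited[i][j]:
--                 path = []
--                 stack = [(i, j)]
--                 while stack:
--                     ci, cj = stack.pop()
--                     if (
--                         ci < 0
--                         or ci >= height
--                         or cj < 0
--                         or cj >= width
--                         or visited[ci][cj]
--                         or grid[ci][cj] == 0
--                     ):
--                         continue
--                     visited[ci][cj] = True
--                     path.append((ci, cj))
--                     for di, dj in reversed(dirs):
--                         stack.append((ci + di, cj + dj))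
--                 if len(path) >= 3:
--                     pathways.append(path)
--     return pathways
-- ===== Notes on version B (the rewrite author's own statement) =====
-- stated objective: alternative
-- what changed: The recursive 8-connected DFS is replaced by an iterative DFS with an explicit stack (pop-time guard and marking, neighbors pushed in reverse direction order), keeping the same outer scan and the len>=3 filter; this also avoids Python's recursion-depth limit on large components.
import Mathlib
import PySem

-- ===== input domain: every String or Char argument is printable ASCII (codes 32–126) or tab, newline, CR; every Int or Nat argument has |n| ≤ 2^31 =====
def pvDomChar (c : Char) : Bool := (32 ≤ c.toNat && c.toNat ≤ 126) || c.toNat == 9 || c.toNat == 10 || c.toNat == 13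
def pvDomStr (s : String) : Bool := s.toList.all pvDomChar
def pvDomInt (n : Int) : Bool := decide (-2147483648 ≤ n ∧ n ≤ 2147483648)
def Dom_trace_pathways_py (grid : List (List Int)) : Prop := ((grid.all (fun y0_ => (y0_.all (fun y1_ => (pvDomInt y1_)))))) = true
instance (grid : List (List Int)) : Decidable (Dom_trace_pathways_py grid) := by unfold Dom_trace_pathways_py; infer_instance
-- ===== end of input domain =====

-- B replaces A's recursive DFS by an iterative explicit-stack DFS (pop-time guard and
-- marking, neighbors pushed in reverse direction order); same outer scan, same ≥3 filter.

-- shared cell/array helpers (indices are always guarded to be in range before use)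
def pvGrid2 (grid : List (List Int)) (i j : Int) : Int := (grid.getD i.toNat []).getD j.toNat 0
def pvVis (v : List (List Bool)) (i j : Int) : Bool := (v.getD i.toNat []).getD j.toNat false
def pvMark (v : List (List Bool)) (i j : Int) : List (List Bool) :=
  v.set i.toNat ((v.getD i.toNat []).set j.toNat true)
-- the DFS guard of both programs (bounds, visited, zero cell)
def pvBlocked (grid : List (List Int)) (H W : Int) (v : List (List Bool)) (i j : Int) : Bool :=
  decide (i < 0) || decide (H ≤ i) || decide (j < 0) || decide (W ≤ j) ||
    pvVis v i j || decide (pvGrid2 grid i j = 0)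

-- ===== PORT A =====  (recursive dfs; the fuel H*W+1 used at the call site bounds the
-- productive recursion depth, which Python's dfs never exceeds: each productive call
-- marks a fresh cell first)
def dfsAGo (grid : List (List Int)) (H W : Int) :
    Nat → (List (List Bool) × List (Int × Int)) → Int → Int → (List (List Bool) × List (Int × Int))
  | 0, st, _, _ => st
  | fuel+1, st, i, j =>
    if pvBlocked grid H W st.1 i j then st
    else
      -- 'for di in [-1, 0, 1]: for dj in [-1, 0, 1]: if di != 0 or dj != 0: dfs(...)'
      ([-1, 0, 1] : List Int).foldl (fun s di =>
        ([-1, 0, 1] : List Int).foldl (fun s dj =>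
          if di ≠ 0 ∨ dj ≠ 0 then dfsAGo grid H W fuel s (i + di) (j + dj) else s) s)
        (pvMark st.1 i j, st.2 ++ [(i, j)])
  termination_by structural fuel _ _ _ => fuel

def trace_pathways_py (grid : List (List Int)) : List (List (Int × Int)) :=
  ((List.range grid.length).foldl (fun st (i : Nat) =>
    (List.range grid.headI.length).foldl (fun st (j : Nat) =>
      if pvGrid2 grid (i : Int) (j : Int) = 1 ∧ pvVis st.1 (i : Int) (j : Int) = false then
        let r := dfsAGo grid (grid.length : Int) (grid.headI.length : Int)
          (grid.length * grid.headI.length + 1) (st.1, []) (i : Int) (j : Int)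
        (r.1, if 3 ≤ r.2.length then st.2 ++ [r.2] else st.2)
      else st) st)
    (List.replicate grid.length (List.replicate grid.headI.length false),
      ([] : List (List (Int × Int))))).2

-- ===== PORT B =====  (explicit stack; list head = top of Python's stack; the fuel
-- 9*H*W+1 used at the call site bounds the number of loop iterations, which Python's
-- while loop never exceeds: every productive pop marks a fresh cell and pushes 8 cells)
def dirs8 : List (Int × Int) := [(-1,-1),(-1,0),(-1,1),(0,-1),(0,1),(1,-1),(1,0),(1,1)]

def loopB (grid : List (List Int)) (H W : Int) :
    Nat → List (List Bool) → List (Int × Int) → List (Int × Int) → (List (List Bool) × List (Int × Int))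
  | 0, v, p, _ => (v, p)
  | fuel+1, v, p, stack =>
    match stack with
    | [] => (v, p)
    | c :: rest =>
      if pvBlocked grid H W v c.1 c.2 then loopB grid H W fuel v p rest
      else loopB grid H W fuel (pvMark v c.1 c.2) (p ++ [(c.1, c.2)])
        ((dirs8.reverse).foldl (fun s d => (c.1 + d.1, c.2 + d.2) :: s) rest)
  termination_by structural fuel _ _ _ => fuel

def trace_pathways_py_alt (grid : List (List Int)) : List (List (Int × Int)) :=
  ((List.range grid.length).foldl (fun st (i : Nat) =>
    (List.range grid.headI.length).foldl (fun st (j : Nat) =>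
      if pvGrid2 grid (i : Int) (j : Int) = 1 ∧ pvVis st.1 (i : Int) (j : Int) = false then
        let r := loopB grid (grid.length : Int) (grid.headI.length : Int)
          (9 * (grid.length * grid.headI.length) + 1) st.1 [] [((i : Int), (j : Int))]
        (r.1, if 3 ≤ r.2.length then st.2 ++ [r.2] else st.2)
      else st) st)
    (List.replicate grid.length (List.replicate grid.headI.length false),
      ([] : List (List (Int × Int))))).2

-- ===== PRECONDITION & SPEC =====
-- Pre_ excludes exactly the inputs where Python A raises IndexError: the empty grid
-- (len(grid[0])) and ragged grids with a row shorter than row 0 (grid[i][j] lookup).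
def Pre_trace_pathways_py (grid : List (List Int)) : Prop :=
  grid ≠ [] ∧ ∀ r ∈ grid, grid.headI.length ≤ r.length
instance (grid : List (List Int)) : Decidable (Pre_trace_pathways_py grid) := by
  unfold Pre_trace_pathways_py; infer_instance
def pvWitness_trace_pathways_py : List (List Int) := [[1, 1, 1]]

def Spec_trace_pathways_py (grid : List (List Int)) (out : List (List (Int × Int))) : Prop := out = trace_pathways_py_alt grid
instance (grid : List (List Int)) (out : List (List (Int × Int))) : Decidable (Spec_trace_pathways_py grid out) := by unfold Spec_trace_pathways_py; infer_instance

-- ===== CLAIM (what is proved, stated in full; the proofs are below) =====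
def Claim_equal_trace_pathways_py : Prop := ∀ (grid : List (List Int)), Dom_trace_pathways_py grid → Pre_trace_pathways_py grid → Spec_trace_pathways_py grid (trace_pathways_py grid)

-- ===== LEMMAS AND PROOFS =====

-- number of not-yet-visited entries (the decreasing quantity of both traversals)
def pvUnvis (v : List (List Bool)) : Nat := (v.map (fun r => r.count false)).sum

-- visited matrix has Hn rows of width Wn
def ShapeV (Hn Wn : Nat) (v : List (List Bool)) : Prop :=
  v.length = Hn ∧ ∀ (i : Nat) (h : i < v.length), v[i].length = Wn

-- folding A's dfs over a todo list
def foldDfs (grid : List (List Int)) (H W : Int) (fuel : Nat) (cs : List (Int × Int))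
    (st : List (List Bool) × List (Int × Int)) : List (List Bool) × List (Int × Int) :=
  cs.foldl (fun st c => dfsAGo grid H W fuel st c.1 c.2) st

def nbrsL (i j : Int) : List (Int × Int) := dirs8.map (fun d => (i + d.1, j + d.2))

theorem pvCountFalseSetTrue (l : List Bool) : ∀ m, m < l.length → l.getD m false = false →
    (l.set m true).count false + 1 = l.count false := by
  induction l with
  | nil => intro m h; simp at h
  | cons b t ih =>
    intro m hm hf
    cases m with
    | zero => simp_all
    | succ m =>
      simp only [List.set_cons_succ, List.count_cons]
      have := ih m (by simpa using hm) (by simpa using hf)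
      omega

theorem pvUnvisSet (v : List (List Bool)) : ∀ n r', n < v.length →
    pvUnvis (v.set n r') + (v.getD n []).count false = pvUnvis v + r'.count false := by
  induction v with
  | nil => intro n r' h; simp at h
  | cons r t ih =>
    intro n r' hn
    cases n with
    | zero => simp [pvUnvis]; omega
    | succ n =>
      have := ih n r' (by simpa using hn)
      simp only [List.set_cons_succ, List.getD_cons_succ] at *
      simp [pvUnvis] at *
      omega

theorem pvUnvisMark (v : List (List Bool)) (i j : Int)
    (hi : i.toNat < v.length) (hj : j.toNat < (v.getD i.toNat []).length)
    (hf : pvVis v i j = false) : pvUnvis (pvMark v i j) + 1 = pvUnvis v := by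
  have h1 := pvCountFalseSetTrue (v.getD i.toNat []) j.toNat hj (by simpa [pvVis] using hf)
  have h2 := pvUnvisSet v i.toNat ((v.getD i.toNat []).set j.toNat true) hi
  simp only [pvMark]
  omega

theorem pvNotBlocked (grid : List (List Int)) (H W : Int) (v : List (List Bool)) (i j : Int)
    (h : ¬ pvBlocked grid H W v i j = true) :
    0 ≤ i ∧ i < H ∧ 0 ≤ j ∧ j < W ∧ pvVis v i j = false ∧ pvGrid2 grid i j ≠ 0 := by
  simp [pvBlocked] at h
  tauto

theorem push_eq_nbrs (i j : Int) (rest : List (Int × Int)) :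
    (dirs8.reverse).foldl (fun s d => (i + d.1, j + d.2) :: s) rest = nbrsL i j ++ rest := by
  simp [dirs8, nbrsL]

theorem dfs_step (grid : List (List Int)) (H W : Int) (f : Nat)
    (st : List (List Bool) × List (Int × Int)) (i j : Int) :
    dfsAGo grid H W (f+1) st i j =
      if pvBlocked grid H W st.1 i j then st
      else foldDfs grid H W f (nbrsL i j) (pvMark st.1 i j, st.2 ++ [(i, j)]) := by
  rw [dfsAGo]
  split
  · rfl
  · simp [foldDfs, nbrsL, dirs8]

theorem foldl_inv {σ α : Type} (P : σ → Prop) (g : σ → α → σ)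
    (h : ∀ s a, P s → P (g s a)) : ∀ (l : List α) (s : σ), P s → P (l.foldl g s) := by
  intro l
  induction l with
  | nil => intro s hs; exact hs
  | cons a t ih => intro s hs; exact ih _ (h s a hs)

theorem pvCountSetTrueLe (l : List Bool) : ∀ m, (l.set m true).count false ≤ l.count false := by
  induction l with
  | nil => intro m; simp
  | cons b t ih =>
    intro m
    cases m with
    | zero => cases b <;> simp [List.count_cons]
    | succ m => simp only [List.set_cons_succ, List.count_cons]; have := ih m; omega

theorem pvUnvisMarkLe (v : List (List Bool)) (i j : Int) :
    pvUnvis (pvMark v i j) ≤ pvUnvis v := by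
  by_cases hi : i.toNat < v.length
  · have h2 := pvUnvisSet v i.toNat ((v.getD i.toNat []).set j.toNat true) hi
    have h1 := pvCountSetTrueLe (v.getD i.toNat []) j.toNat
    simp only [pvMark]; omega
  · unfold pvMark
    rw [List.set_eq_of_length_le (by omega)]

theorem shape_mark (Hn Wn : Nat) (v : List (List Bool)) (i j : Int)
    (hs : ShapeV Hn Wn v) : ShapeV Hn Wn (pvMark v i j) := by
  obtain ⟨hl, hr⟩ := hs
  refine ⟨by simpa [pvMark] using hl, ?_⟩
  intro k hk
  simp only [pvMark, List.length_set] at hk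
  simp only [pvMark]
  rw [List.getElem_set]
  split
  · rename_i heq
    subst heq
    rw [List.length_set, List.getD_eq_getElem _ _ hk]
    exact hr _ hk
  · exact hr _ hk

theorem dfs_inv (grid : List (List Int)) (Hn Wn : Nat) :
    ∀ (f : Nat) (st : List (List Bool) × List (Int × Int)) (i j : Int),
      ShapeV Hn Wn st.1 →
      ShapeV Hn Wn (dfsAGo grid (Hn : Int) (Wn : Int) f st i j).1 ∧
        pvUnvis (dfsAGo grid (Hn : Int) (Wn : Int) f st i j).1 ≤ pvUnvis st.1 := by
  intro f
  induction f with
  | zero => intro st i j hs; rw [dfsAGo]; exact ⟨hs, le_refl _⟩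
  | succ f ih =>
    intro st i j hs
    rw [dfs_step]
    split
    · exact ⟨hs, le_refl _⟩
    · have hmono := foldl_inv
        (fun s : List (List Bool) × List (Int × Int) =>
          ShapeV Hn Wn s.1 ∧ pvUnvis s.1 ≤ pvUnvis (pvMark st.1 i j))
        (fun s c => dfsAGo grid (Hn : Int) (Wn : Int) f s c.1 c.2)
        (fun s c hp => ⟨(ih s c.1 c.2 hp.1).1, le_trans (ih s c.1 c.2 hp.1).2 hp.2⟩)
        (nbrsL i j) (pvMark st.1 i j, st.2 ++ [(i, j)])
        ⟨shape_mark Hn Wn st.1 i j hs, le_refl _⟩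
      exact ⟨hmono.1, le_trans hmono.2 (pvUnvisMarkLe st.1 i j)⟩

theorem foldDfs_inv (grid : List (List Int)) (Hn Wn : Nat) (f : Nat) (cs : List (Int × Int))
    (st : List (List Bool) × List (Int × Int)) (hs : ShapeV Hn Wn st.1) :
    ShapeV Hn Wn (foldDfs grid (Hn : Int) (Wn : Int) f cs st).1 ∧
      pvUnvis (foldDfs grid (Hn : Int) (Wn : Int) f cs st).1 ≤ pvUnvis st.1 := by
  exact foldl_inv (fun s => ShapeV Hn Wn s.1 ∧ pvUnvis s.1 ≤ pvUnvis st.1)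
    (fun s c => dfsAGo grid (Hn : Int) (Wn : Int) f s c.1 c.2)
    (fun s c hp => ⟨(dfs_inv grid Hn Wn f s c.1 c.2 hp.1).1,
      le_trans (dfs_inv grid Hn Wn f s c.1 c.2 hp.1).2 hp.2⟩) cs st ⟨hs, le_refl _⟩

theorem loop_nil (grid : List (List Int)) (H W : Int) (f : Nat) (v : List (List Bool))
    (p : List (Int × Int)) : loopB grid H W f v p [] = (v, p) := by
  cases f <;> rw [loopB]

-- the loop's result does not depend on the fuel once the fuel covers the iteration bound
theorem loop_stable (grid : List (List Int)) (Hn Wn : Nat) :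
    ∀ (n f f' : Nat) (v : List (List Bool)) (p s : List (Int × Int)),
      9 * pvUnvis v + s.length ≤ n → ShapeV Hn Wn v →
      9 * pvUnvis v + s.length ≤ f → 9 * pvUnvis v + s.length ≤ f' →
      loopB grid (Hn : Int) (Wn : Int) f v p s = loopB grid (Hn : Int) (Wn : Int) f' v p s := by
  intro n
  induction n using Nat.strong_induction_on with
  | _ n IH =>
    intro f f' v p s hn hs hf hf'
    cases s with
    | nil => rw [loop_nil, loop_nil]
    | cons c rest =>
      obtain ⟨f, rfl⟩ : ∃ g, f = g + 1 := ⟨f - 1, by simp only [List.length_cons] at hf; omega⟩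
      obtain ⟨f', rfl⟩ : ∃ g, f' = g + 1 := ⟨f' - 1, by simp only [List.length_cons] at hf'; omega⟩
      rw [loopB, loopB]
      by_cases hb : pvBlocked grid (Hn : Int) (Wn : Int) v c.1 c.2 = true
      · rw [if_pos hb, if_pos hb]
        exact IH (9 * pvUnvis v + rest.length)
          (by simp only [List.length_cons] at hn; omega) f f' v p rest
          (le_refl _) hs (by simp only [List.length_cons] at hf; omega)
          (by simp only [List.length_cons] at hf'; omega)
      · obtain ⟨h1, h2, h3, h4, hvis, h6⟩ := pvNotBlocked grid (Hn : Int) (Wn : Int) v c.1 c.2 hb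
        have hi : c.1.toNat < v.length := by rw [hs.1]; omega
        have hj : c.2.toNat < (v.getD c.1.toNat []).length := by
          rw [List.getD_eq_getElem _ _ hi, hs.2 _ hi]; omega
        have hm := pvUnvisMark v c.1 c.2 hi hj hvis
        rw [if_neg hb, if_neg hb, push_eq_nbrs]
        have hlen : (nbrsL c.1 c.2 ++ rest).length = rest.length + 8 := by
          simp [nbrsL, dirs8]
        exact IH (9 * pvUnvis (pvMark v c.1 c.2) + (nbrsL c.1 c.2 ++ rest).length)
          (by simp only [List.length_cons] at hn; omega)
          f f' (pvMark v c.1 c.2) (p ++ [(c.1, c.2)]) (nbrsL c.1 c.2 ++ rest)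
          (le_refl _) (shape_mark Hn Wn v c.1 c.2 hs)
          (by simp only [List.length_cons] at hf; omega)
          (by simp only [List.length_cons] at hf'; omega)

-- the heart: running the stack loop on cs ++ ds equals folding the recursive dfs over cs first
theorem loop_eq_dfs (grid : List (List Int)) (Hn Wn : Nat) :
    ∀ (n fuel fL : Nat) (v : List (List Bool)) (p : List (Int × Int)) (cs ds : List (Int × Int)),
      9 * pvUnvis v + cs.length ≤ n → ShapeV Hn Wn v → pvUnvis v < fuel →
      9 * pvUnvis v + (cs ++ ds).length ≤ fL →
      loopB grid (Hn : Int) (Wn : Int) fL v p (cs ++ ds) =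
        (fun st => loopB grid (Hn : Int) (Wn : Int) (9 * pvUnvis st.1 + ds.length + 1) st.1 st.2 ds)
          (foldDfs grid (Hn : Int) (Wn : Int) fuel cs (v, p)) := by
  intro n
  induction n using Nat.strong_induction_on with
  | _ n IH =>
    intro fuel fL v p cs ds hn hs hf hfL
    cases cs with
    | nil =>
      simp only [foldDfs, List.foldl_nil, List.nil_append]
      exact loop_stable grid Hn Wn (9 * pvUnvis v + ds.length) fL
        (9 * pvUnvis v + ds.length + 1) v p ds (le_refl _) hs
        (by simpa using hfL) (by omega)
    | cons c cs' =>
      obtain ⟨fuel, rfl⟩ : ∃ g, fuel = g + 1 := ⟨fuel - 1, by omega⟩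
      obtain ⟨fL, rfl⟩ : ∃ g, fL = g + 1 :=
        ⟨fL - 1, by simp only [List.cons_append, List.length_cons] at hfL; omega⟩
      rw [List.cons_append, loopB]
      by_cases hb : pvBlocked grid (Hn : Int) (Wn : Int) v c.1 c.2 = true
      · rw [if_pos hb]
        have step : foldDfs grid (Hn : Int) (Wn : Int) (fuel+1) (c :: cs') (v, p)
            = foldDfs grid (Hn : Int) (Wn : Int) (fuel+1) cs' (v, p) := by
          simp only [foldDfs, List.foldl_cons]
          rw [dfs_step, if_pos hb]
        rw [step]
        exact IH (9 * pvUnvis v + cs'.length) (by simp only [List.length_cons] at hn; omega)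
          (fuel+1) fL v p cs' ds (le_refl _) hs hf
          (by simp only [List.length_cons, List.length_append] at hfL ⊢; omega)
      · obtain ⟨h1, h2, h3, h4, hvis, h6⟩ := pvNotBlocked grid (Hn : Int) (Wn : Int) v c.1 c.2 hb
        have hi : c.1.toNat < v.length := by rw [hs.1]; omega
        have hj : c.2.toNat < (v.getD c.1.toNat []).length := by
          rw [List.getD_eq_getElem _ _ hi, hs.2 _ hi]; omega
        have hm := pvUnvisMark v c.1 c.2 hi hj hvis
        have hsm := shape_mark Hn Wn v c.1 c.2 hs
        rw [if_neg hb, push_eq_nbrs]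
        have hnlen : (nbrsL c.1 c.2).length = 8 := by simp [nbrsL, dirs8]
        -- first IH application: consume the 8 neighbors with dfs fuel `fuel`
        have ih1 := IH (9 * pvUnvis (pvMark v c.1 c.2) + (nbrsL c.1 c.2).length)
          (by simp only [List.length_cons] at hn; omega)
          fuel fL (pvMark v c.1 c.2) (p ++ [(c.1, c.2)])
          (nbrsL c.1 c.2) (cs' ++ ds) (le_refl _) hsm (by omega)
          (by simp only [List.length_cons, List.length_append] at hfL ⊢; omega)
        rw [ih1]
        beta_reduce
        have hinv := foldDfs_inv grid Hn Wn fuel (nbrsL c.1 c.2)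
          (pvMark v c.1 c.2, p ++ [(c.1, c.2)]) hsm
        have hinv2 : pvUnvis (foldDfs grid (Hn : Int) (Wn : Int) fuel (nbrsL c.1 c.2)
            (pvMark v c.1 c.2, p ++ [(c.1, c.2)])).1 ≤ pvUnvis (pvMark v c.1 c.2) := hinv.2
        -- second IH application: consume cs' with dfs fuel `fuel+1`
        have ih2 := IH (9 * pvUnvis (foldDfs grid (Hn : Int) (Wn : Int) fuel (nbrsL c.1 c.2)
            (pvMark v c.1 c.2, p ++ [(c.1, c.2)])).1 + cs'.length)
          (by simp only [List.length_cons] at hn; omega) (fuel+1)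
          (9 * pvUnvis (foldDfs grid (Hn : Int) (Wn : Int) fuel (nbrsL c.1 c.2)
            (pvMark v c.1 c.2, p ++ [(c.1, c.2)])).1 + (cs' ++ ds).length + 1)
          (foldDfs grid (Hn : Int) (Wn : Int) fuel (nbrsL c.1 c.2)
            (pvMark v c.1 c.2, p ++ [(c.1, c.2)])).1
          (foldDfs grid (Hn : Int) (Wn : Int) fuel (nbrsL c.1 c.2)
            (pvMark v c.1 c.2, p ++ [(c.1, c.2)])).2 cs' ds (le_refl _) hinv.1 (by omega)
          (by omega)
        rw [ih2]
        beta_reduce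
        have step : foldDfs grid (Hn : Int) (Wn : Int) (fuel+1) (c :: cs') (v, p)
            = foldDfs grid (Hn : Int) (Wn : Int) (fuel+1) cs'
              (foldDfs grid (Hn : Int) (Wn : Int) fuel (nbrsL c.1 c.2)
                (pvMark v c.1 c.2, p ++ [(c.1, c.2)])) := by
          simp only [foldDfs, List.foldl_cons]
          rw [dfs_step, if_neg hb]
          rfl
        rw [step]

theorem foldl_congr_inv {σ α : Type} (P : σ → Prop) (f g : σ → α → σ)
    (h : ∀ s a, P s → f s a = g s a ∧ P (f s a)) :
    ∀ (l : List α) (s : σ), P s → l.foldl f s = l.foldl g s ∧ P (l.foldl f s) := by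
  intro l
  induction l with
  | nil => intro s hs; exact ⟨rfl, hs⟩
  | cons a t ih =>
    intro s hs
    obtain ⟨he, hp⟩ := h s a hs
    obtain ⟨ht, hp'⟩ := ih (f s a) hp
    exact ⟨by rw [List.foldl_cons, List.foldl_cons, ← he, ht, he], hp'⟩

theorem seed_eq (grid : List (List Int)) (Hn Wn : Nat) (v : List (List Bool)) (i j : Int)
    (hs : ShapeV Hn Wn v) (hf : pvUnvis v ≤ Hn * Wn) :
    dfsAGo grid (Hn : Int) (Wn : Int) (Hn * Wn + 1) (v, []) i j =
      loopB grid (Hn : Int) (Wn : Int) (9 * (Hn * Wn) + 1) v [] [(i, j)] := by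
  have h := loop_eq_dfs grid Hn Wn (9 * pvUnvis v + 1) (Hn * Wn + 1) (9 * (Hn * Wn) + 1)
    v [] [(i, j)] [] (le_refl _) hs (by omega) (by simp only [List.append_nil, List.length_cons, List.length_nil]; omega)
  simp only [List.append_nil] at h
  rw [h]
  rw [loop_nil]
  simp [foldDfs]

theorem unvis_init (Hn Wn : Nat) :
    pvUnvis (List.replicate Hn (List.replicate Wn false)) = Hn * Wn := by
  simp [pvUnvis, List.map_replicate, List.sum_replicate, smul_eq_mul]

theorem shape_init (Hn Wn : Nat) :
    ShapeV Hn Wn (List.replicate Hn (List.replicate Wn false)) := by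
  constructor
  · simp
  · intro i h; simp

-- ===== VERDICT (by name: the statement is the Claim_ definition above) =====
theorem trace_pathways_py_spec : Claim_equal_trace_pathways_py := by
  intro grid _ _
  unfold Spec_trace_pathways_py trace_pathways_py trace_pathways_py_alt
  have main := foldl_congr_inv
    (fun st : List (List Bool) × List (List (Int × Int)) =>
      ShapeV grid.length grid.headI.length st.1 ∧ pvUnvis st.1 ≤ grid.length * grid.headI.length)
    (fun st (i : Nat) => (List.range grid.headI.length).foldl (fun st (j : Nat) =>
      if pvGrid2 grid (i : Int) (j : Int) = 1 ∧ pvVis st.1 (i : Int) (j : Int) = false then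
        let r := dfsAGo grid (grid.length : Int) (grid.headI.length : Int)
          (grid.length * grid.headI.length + 1) (st.1, []) (i : Int) (j : Int)
        (r.1, if 3 ≤ r.2.length then st.2 ++ [r.2] else st.2)
      else st) st)
    (fun st (i : Nat) => (List.range grid.headI.length).foldl (fun st (j : Nat) =>
      if pvGrid2 grid (i : Int) (j : Int) = 1 ∧ pvVis st.1 (i : Int) (j : Int) = false then
        let r := loopB grid (grid.length : Int) (grid.headI.length : Int)
          (9 * (grid.length * grid.headI.length) + 1) st.1 [] [((i : Int), (j : Int))]
        (r.1, if 3 ≤ r.2.length then st.2 ++ [r.2] else st.2)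
      else st) st)
    (fun st (i : Nat) hP =>
      foldl_congr_inv
        (fun st : List (List Bool) × List (List (Int × Int)) =>
          ShapeV grid.length grid.headI.length st.1 ∧
            pvUnvis st.1 ≤ grid.length * grid.headI.length)
        (fun st (j : Nat) =>
          if pvGrid2 grid (i : Int) (j : Int) = 1 ∧ pvVis st.1 (i : Int) (j : Int) = false then
            let r := dfsAGo grid (grid.length : Int) (grid.headI.length : Int)
              (grid.length * grid.headI.length + 1) (st.1, []) (i : Int) (j : Int)
            (r.1, if 3 ≤ r.2.length then st.2 ++ [r.2] else st.2)
          else st)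
        (fun st (j : Nat) =>
          if pvGrid2 grid (i : Int) (j : Int) = 1 ∧ pvVis st.1 (i : Int) (j : Int) = false then
            let r := loopB grid (grid.length : Int) (grid.headI.length : Int)
              (9 * (grid.length * grid.headI.length) + 1) st.1 [] [((i : Int), (j : Int))]
            (r.1, if 3 ≤ r.2.length then st.2 ++ [r.2] else st.2)
          else st)
        (fun st (j : Nat) hP => by
          by_cases hc : pvGrid2 grid (i : Int) (j : Int) = 1 ∧ pvVis st.1 (i : Int) (j : Int) = false
          · simp only [if_pos hc]
            have hseed := seed_eq grid grid.length grid.headI.length st.1 (i : Int) (j : Int)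
              hP.1 hP.2
            have hinv := dfs_inv grid grid.length grid.headI.length
              (grid.length * grid.headI.length + 1) (st.1, []) (i : Int) (j : Int) hP.1
            have hinv2 : pvUnvis (dfsAGo grid (grid.length : Int) (grid.headI.length : Int)
                (grid.length * grid.headI.length + 1) (st.1, []) (i : Int) (j : Int)).1 ≤
                pvUnvis st.1 := hinv.2
            refine ⟨?_, ?_, ?_⟩
            · rw [hseed]
            · exact hinv.1
            · exact le_trans hinv2 hP.2
          · simp only [if_neg hc]; exact ⟨trivial, hP⟩)
        (List.range grid.headI.length) st hP)
    (List.range grid.length)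
    (List.replicate grid.length (List.replicate grid.headI.length false),
      ([] : List (List (Int × Int))))
    ⟨shape_init grid.length grid.headI.length, by rw [unvis_init]⟩
  rw [main.1]
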